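-- pv_equiv track=rewrite | github.com/perry-data/tcm-classic-rag | run_minimal_retrieval.py | build_query_terms
-- ===== SOURCE A (Python) =====
-- def build_query_terms(focus_text: str) -> list[str]:
--     if not focus_text:
--         return []
--     terms: set[str] = {focus_text}
--     if 2 <= len(focus_text) <= 24:
--         for n in range(min(4, len(focus_text)), 1, -1):
--             for idx in range(0, len(focus_text) - n + 1):
--                 terms.add(focus_text[idx : idx + n])
--     return sorted(terms, key=lambda item: (-len(item), item))
-- ===== SOURCE B (Python) =====
-- def build_query_terms(focus_text: str) -> list[str]:
--     n = len(focus_text)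
--     if n == 0:
--         return []
--     if n == 1 or n > 24:
--         return [focus_text]
--     out = [focus_text] if n > 4 else []
--     for length in range(min(4, n), 1, -1):
--         out += _radix_collect(focus_text, list(range(n - length + 1)), "", length)
--     return out
--
--
-- def _radix_collect(text: str, positions: list[int], prefix: str, remaining: int) -> list[str]:
--     # Implicit-trie DFS: positions are the starts whose window so far equals prefix.
--     # Branching on the next character in ascending order yields each length bucket
--     # already deduplicated and lexicographically sorted, so no keyed sort is needed.
--     if remaining == 0:
--         return [prefix]
--     res = []
--     for ch in sorted({text[p] for p in positions}):
--         res += _radix_collect(text, [p + 1 for p in positions if text[p] == ch],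
--                               prefix + ch, remaining - 1)
--     return res
-- ===== Notes on version B (the rewrite author's own statement) =====
-- stated objective: alternative
-- what changed: A materialises every substring of lengths 2-4 into one set and sorts it once with the tuple key (-len, item); B never builds that set or calls a keyed sort: it runs an implicit-trie radix DFS over start positions, branching on the next character in ascending order, which emits each length bucket deduplicated and already lexicographically sorted, with the full text prepended when it is longer than 4.
import Mathlib
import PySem

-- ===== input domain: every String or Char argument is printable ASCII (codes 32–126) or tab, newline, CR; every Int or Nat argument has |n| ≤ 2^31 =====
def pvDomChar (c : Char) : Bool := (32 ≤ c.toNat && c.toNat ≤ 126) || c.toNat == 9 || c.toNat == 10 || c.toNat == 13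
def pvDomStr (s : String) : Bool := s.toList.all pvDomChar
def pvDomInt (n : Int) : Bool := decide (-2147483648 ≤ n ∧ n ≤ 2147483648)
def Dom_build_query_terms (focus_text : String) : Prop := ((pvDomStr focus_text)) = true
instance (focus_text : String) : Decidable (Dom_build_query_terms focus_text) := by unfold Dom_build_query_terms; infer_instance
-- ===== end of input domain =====

-- B replaces A's materialise-all-substrings set + keyed sort (-len, item) by an implicit-trie
-- radix DFS over start positions that emits each length bucket deduplicated and already in
-- lexicographic order (objective: alternative).

-- ===== PORT A =====
def build_query_terms (focus_text : String) : List String :=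
  if focus_text.toList = [] then []
  else
    let n : Int := PySem.Str.len focus_text
    let terms0 : PySem.Set String := PySem.Set.add PySem.Set.empty focus_text
    let terms : PySem.Set String :=
      if 2 ≤ n ∧ n ≤ 24 then
        (PySem.List.pyRange (min 4 n) 1 (-1)).foldl (fun acc L =>
          (PySem.List.pyRange 0 (n - L + 1) 1).foldl (fun acc2 idx =>
            PySem.Set.add acc2 (PySem.Str.slice focus_text (some idx) (some (idx + L)))) acc) terms0
      else terms0
    PySem.List.sorted2 terms (fun item => -(PySem.Str.len item)) (fun item => item) false

-- ===== PORT B =====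
-- _radix_collect: strings are handled on the List Char side (PySem's string model);
-- text[p] is ported as cs.getD p.toNat 'a' — exact because every position handed to the
-- recursion is in range; the `remaining` counter is the structural recursion argument.
def radixCollect (cs : List Char) (rem : Nat) (positions : List Int) (pre : List Char) :
    List (List Char) :=
  match rem with
  | 0 => [pre]
  | Nat.succ r =>
      (PySem.List.sorted (PySem.Set.ofList (positions.map (fun p => cs.getD p.toNat 'a')))
          (fun c => c) false).foldl
        (fun res ch =>
          res ++ radixCollect cs r
            ((positions.filter (fun p => cs.getD p.toNat 'a' == ch)).map (· + 1))
            (pre ++ [ch])) []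

def build_query_terms_alt (focus_text : String) : List String :=
  let n : Int := PySem.Str.len focus_text
  if n = 0 then []
  else if n = 1 ∨ 24 < n then [focus_text]
  else
    let head : List String := if 4 < n then [focus_text] else []
    (PySem.List.pyRange (min 4 n) 1 (-1)).foldl (fun out L =>
      out ++ (radixCollect focus_text.toList L.toNat
                (PySem.List.pyRange 0 (n - L + 1) 1) []).map String.ofList) head

-- ===== PRECONDITION & SPEC =====
def Spec_build_query_terms (focus_text : String) (out : List String) : Prop := out = build_query_terms_alt focus_text
instance (focus_text : String) (out : List String) : Decidable (Spec_build_query_terms focus_text out) := by unfold Spec_build_query_terms; infer_instance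

-- ===== CLAIM (what is proved, stated in full; the proofs are below) =====
def Claim_equal_build_query_terms : Prop := ∀ (focus_text : String), Dom_build_query_terms focus_text → Spec_build_query_terms focus_text (build_query_terms focus_text)

-- ===== LEMMAS AND PROOFS =====

-- the sort key of A, as a lexicographic pair
def keyBQ (s : String) : Lex (Int × String) := toLex (-(PySem.Str.len s), s)

def subsBQ (t : String) (L : Nat) : List String :=
  (List.range (t.toList.length - L + 1)).map
    (fun i : Nat => PySem.Str.slice t (some (i : Int)) (some ((i : Int) + (L : Int))))

lemma range_map_eq_subs (t : String) (L : Nat) (hL : L ≤ t.toList.length) :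
    (PySem.List.pyRange 0 ((t.toList.length : Int) - (L : Int) + 1) 1).map
        (fun i => PySem.Str.slice t (some i) (some (i + (L : Int))))
      = subsBQ t L := by
  rw [PySem.List.pyRange_one, List.map_map,
    show ((((t.toList.length : Int)) - (L : Int) + 1) - 0).toNat = t.toList.length - L + 1 by omega]
  unfold subsBQ
  apply List.map_congr_left
  intro k _
  simp

lemma toList_of_mem_subs {t : String} {L : Nat} {x : String} (hx : x ∈ subsBQ t L)
    (hL : L ≤ t.toList.length) : ∃ i, i + L ≤ t.toList.length ∧ x.toList = (t.toList.drop i).take L := by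
  unfold subsBQ at hx
  rw [List.mem_map] at hx
  obtain ⟨i, hi, rfl⟩ := hx
  rw [List.mem_range] at hi
  refine ⟨i, by omega, ?_⟩
  simp [PySem.Str.toList_slice, PySem.Chars.slice_eq_listSlice, PySem.List.slice_natCast_add]

lemma self_mem_subs (t : String) (_h1 : 1 ≤ t.toList.length) : t ∈ subsBQ t (t.toList.length) := by
  unfold subsBQ
  rw [List.mem_map]
  refine ⟨0, by simp, ?_⟩
  apply String.toList_inj.mp
  have h := PySem.List.slice_natCast_add t.toList 0 t.toList.length
  simp [PySem.Str.toList_slice, PySem.Chars.slice_eq_listSlice] at h ⊢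

lemma sorted2_lex (xs : List String) (k1 : String → Int) :
    PySem.List.sorted2 xs k1 (fun x => x) false
      = PySem.List.sorted xs (fun x => toLex (k1 x, x)) false := by
  rw [PySem.List.sorted_eq_foldl_insertBy]
  simp only [PySem.List.sorted2, Bool.false_eq_true, if_false]
  congr 1
  funext acc x
  congr 1
  funext a b
  rw [Bool.eq_iff_iff]
  simp only [Bool.or_eq_true, Bool.and_eq_true, Bool.not_eq_eq_eq_not, Bool.not_true,
    decide_eq_true_eq, decide_eq_false_iff_not, Prod.Lex.lt_iff, ofLex_toLex]
  constructor
  · rintro (h | ⟨h, h2⟩)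
    · left; exact h
    · by_cases hx : k1 a < k1 b
      · left; exact hx
      · right; exact ⟨by omega, h2⟩
  · rintro (h | ⟨h, h2⟩)
    · left; exact h
    · right; exact ⟨by omega, h2⟩

-- one bucket: the distinct substrings of length L, sorted lexicographically
def bucketBQ (t : String) (L : Nat) : List String :=
  PySem.List.sorted (PySem.Set.ofList (subsBQ t L)) (fun x => x) false

lemma foldl_add_map (xs : List Int) (f : Int → String) (s : PySem.Set String) :
    xs.foldl (fun a i => PySem.Set.add a (f i)) s = PySem.Set.update s (xs.map f) := by
  rw [PySem.Set.update_eq_foldl, List.foldl_map]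

lemma foldl_update (Ls : List Int) (g : Int → List String) (s : PySem.Set String) :
    Ls.foldl (fun a L => PySem.Set.update a (g L)) s = PySem.Set.update s (Ls.flatMap g) := by
  induction Ls generalizing s with
  | nil => simp [PySem.Set.update_eq_foldl]
  | cons L Ls ih =>
    simp only [List.foldl_cons, ih, List.flatMap_cons]
    rw [PySem.Set.update_eq_foldl, PySem.Set.update_eq_foldl, PySem.Set.update_eq_foldl,
      List.foldl_append]

lemma update_ofList (l0 xs : List String) :
    PySem.Set.update (PySem.Set.ofList l0) xs = PySem.Set.ofList (l0 ++ xs) := by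
  rw [PySem.Set.update_eq_foldl, PySem.Set.ofList_eq_foldl, PySem.Set.ofList_eq_foldl,
    List.foldl_append]

lemma len_of_mem_subs {t : String} {L : Nat} {x : String} (hx : x ∈ subsBQ t L)
    (hL : L ≤ t.toList.length) : x.toList.length = L := by
  obtain ⟨i, hi, hxl⟩ := toList_of_mem_subs hx hL
  rw [hxl]
  simp only [List.length_take, List.length_drop]
  omega

lemma mem_bucket (t : String) (L : Nat) (x : String) : x ∈ bucketBQ t L ↔ x ∈ subsBQ t L := by
  rw [bucketBQ, PySem.List.mem_sorted, PySem.Set.mem_ofList]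

lemma key_lt_of_len_gt {a b : String} (h : b.toList.length < a.toList.length) :
    keyBQ a < keyBQ b := by
  rw [keyBQ, keyBQ, Prod.Lex.lt_iff]
  left
  simp only [ofLex_toLex, PySem.Str.len_eq]
  omega

lemma key_lt_of_len_eq_lt {a b : String} (hlen : a.toList.length = b.toList.length)
    (h : a < b) : keyBQ a < keyBQ b := by
  rw [keyBQ, keyBQ, Prod.Lex.lt_iff]
  right
  refine ⟨?_, h⟩
  simp only [ofLex_toLex, PySem.Str.len_eq]
  omega

lemma bucket_pairwise (t : String) (L : Nat) (hL : L ≤ t.toList.length) :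
    (bucketBQ t L).Pairwise (fun a b => keyBQ a < keyBQ b) := by
  have h := PySem.List.sorted_ofList_pairwise_lt (subsBQ t L)
  refine List.Pairwise.imp_of_mem (fun {a b} ha hb hab => ?_) h
  have la := len_of_mem_subs ((mem_bucket t L a).mp ha) hL
  have lb := len_of_mem_subs ((mem_bucket t L b).mp hb) hL
  exact key_lt_of_len_eq_lt (la.trans lb.symm) hab

lemma flat_pairwise (t : String) (Ls : List Nat) (hp : Ls.Pairwise (· > ·))
    (hball : ∀ L ∈ Ls, L ≤ t.toList.length) :
    (Ls.flatMap (bucketBQ t)).Pairwise (fun a b => keyBQ a < keyBQ b) := by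
  induction Ls with
  | nil => simp
  | cons L Ls ih =>
    rw [List.flatMap_cons, List.pairwise_append]
    refine ⟨bucket_pairwise t L (hball L (by simp)),
      ih hp.of_cons (fun K hK => hball K (by simp [hK])), ?_⟩
    intro a ha b hb
    rw [List.mem_flatMap] at hb
    obtain ⟨K, hK, hbK⟩ := hb
    have hKL : K < L := (List.pairwise_cons.mp hp).1 K hK
    have la := len_of_mem_subs ((mem_bucket t L a).mp ha) (hball L (by simp))
    have lb := len_of_mem_subs ((mem_bucket t K b).mp hbK) (hball K (by simp [hK]))
    exact key_lt_of_len_gt (by omega)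

lemma mainBQ (t : String) (Ls : List Nat)
    (hp : Ls.Pairwise (· > ·))
    (hball : ∀ L ∈ Ls, 1 ≤ L ∧ L ≤ 4 ∧ L ≤ t.toList.length)
    (hcov : 4 < t.toList.length ∨ t.toList.length ∈ Ls) :
    PySem.List.sorted (PySem.Set.ofList (t :: Ls.flatMap (subsBQ t))) keyBQ false
      = (if 4 < t.toList.length then [t] else []) ++ Ls.flatMap (bucketBQ t) := by
  have hpw : ((if 4 < t.toList.length then [t] else []) ++ Ls.flatMap (bucketBQ t)).Pairwise
      (fun a b => keyBQ a < keyBQ b) := by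
    rw [List.pairwise_append]
    refine ⟨by split <;> simp, flat_pairwise t Ls hp (fun L hL => (hball L hL).2.2), ?_⟩
    intro a ha b hb
    split at ha
    case isTrue h4 =>
      rw [List.mem_singleton] at ha
      rw [List.mem_flatMap] at hb
      obtain ⟨K, hK, hbK⟩ := hb
      have lb := len_of_mem_subs ((mem_bucket t K b).mp hbK) (hball K hK).2.2
      have := (hball K hK).2.1
      rw [ha]
      exact key_lt_of_len_gt (by omega)
    case isFalse => simp at ha
  refine PySem.List.sorted_eq_of_perm_of_pairwise_lt _ _ _ ?_ hpw
  refine List.perm_of_nodup_nodup_toFinset_eq ?_ (PySem.Set.nodup_ofList _) ?_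
  · exact hpw.imp (fun {a b} hab heq => absurd (heq ▸ hab) (lt_irrefl _))
  · ext x
    by_cases h4 : 4 < t.toList.length
    · simp only [List.mem_toFinset, PySem.Set.mem_ofList, List.mem_cons, if_pos h4,
        List.mem_append, List.mem_flatMap, mem_bucket]
      tauto
    · have hm : t.toList.length ∈ Ls := hcov.resolve_left h4
      have h1 : 1 ≤ t.toList.length := (hball _ hm).1
      simp only [List.mem_toFinset, PySem.Set.mem_ofList, List.mem_cons, if_neg h4,
        List.mem_flatMap, mem_bucket, List.nil_append]
      constructor
      · intro h
        right
        exact h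
      · rintro (h | h)
        · exact ⟨t.toList.length, hm, h ▸ self_mem_subs t h1⟩
        · exact h

-- ----- properties of the radix DFS -----

lemma radix_prefix (cs : List Char) : ∀ (rem : Nat) (positions : List Int) (pre x : List Char),
    x ∈ radixCollect cs rem positions pre → ∃ u, x = pre ++ u := by
  intro rem
  induction rem with
  | zero =>
    intro positions pre x hx
    simp only [radixCollect, List.mem_singleton] at hx
    exact ⟨[], by simp [hx]⟩
  | succ r ih =>
    intro positions pre x hx
    rw [radixCollect, PySem.List.foldl_append_eq_flatMap, List.nil_append,
      List.mem_flatMap] at hx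
    obtain ⟨ch, _, hx⟩ := hx
    obtain ⟨u, rfl⟩ := ih _ _ _ hx
    exact ⟨ch :: u, by simp⟩

lemma radix_pairwise (cs : List Char) : ∀ (rem : Nat) (positions : List Int) (pre : List Char),
    (radixCollect cs rem positions pre).Pairwise (· < ·) := by
  intro rem
  induction rem with
  | zero => intro positions pre; simp [radixCollect]
  | succ r ih =>
    intro positions pre
    rw [radixCollect, PySem.List.foldl_append_eq_flatMap, List.nil_append]
    have hchs := PySem.List.sorted_ofList_pairwise_lt
      (positions.map (fun p => cs.getD p.toNat 'a'))
    generalize (PySem.List.sorted (PySem.Set.ofList (positions.map (fun p => cs.getD p.toNat 'a')))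
      (fun c => c) false) = chs at *
    induction chs with
    | nil => simp
    | cons ch chs ihc =>
      rw [List.flatMap_cons, List.pairwise_append]
      refine ⟨ih _ _, ihc hchs.of_cons, ?_⟩
      intro x hx y hy
      rw [List.mem_flatMap] at hy
      obtain ⟨ch', hch', hy⟩ := hy
      obtain ⟨u, rfl⟩ := radix_prefix cs r _ _ _ hx
      obtain ⟨v, rfl⟩ := radix_prefix cs r _ _ _ hy
      have hlt : ch < ch' := (List.pairwise_cons.mp hchs).1 ch' hch'
      simp only [List.append_assoc, List.singleton_append]
      apply List.append_left_lt
      rw [List.cons_lt_cons_iff]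
      exact Or.inl hlt

lemma radix_mem (cs : List Char) : ∀ (rem : Nat) (positions : List Int) (pre : List Char),
    positions ≠ [] → (∀ p ∈ positions, 0 ≤ p ∧ p.toNat + rem ≤ cs.length) →
    ∀ x, x ∈ radixCollect cs rem positions pre ↔
      ∃ p ∈ positions, x = pre ++ (cs.drop p.toNat).take rem := by
  intro rem
  induction rem with
  | zero =>
    intro positions pre hne _ x
    simp only [radixCollect, List.mem_singleton, List.take_zero, List.append_nil]
    constructor
    · intro h
      obtain ⟨p, hp⟩ := List.exists_mem_of_ne_nil positions hne
      exact ⟨p, hp, h⟩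
    · rintro ⟨p, _, h⟩
      exact h
  | succ r ih =>
    intro positions pre hne hpos x
    rw [radixCollect, PySem.List.foldl_append_eq_flatMap, List.nil_append, List.mem_flatMap]
    constructor
    · rintro ⟨ch, hch, hx⟩
      rw [PySem.List.mem_sorted, PySem.Set.mem_ofList, List.mem_map] at hch
      obtain ⟨p0, hp0, hf0⟩ := hch
      have hne' : (positions.filter (fun p => cs.getD p.toNat 'a' == ch)).map (· + 1) ≠ [] := by
        simp only [ne_eq, List.map_eq_nil_iff, List.filter_eq_nil_iff, not_forall]
        exact ⟨p0, hp0, by simpa [List.getD] using hf0⟩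
      have hpos' : ∀ q ∈ (positions.filter (fun p => cs.getD p.toNat 'a' == ch)).map (· + 1),
          0 ≤ q ∧ q.toNat + r ≤ cs.length := by
        intro q hq
        rw [List.mem_map] at hq
        obtain ⟨p, hp, rfl⟩ := hq
        have := hpos p (List.mem_of_mem_filter hp)
        omega
      rw [ih _ _ hne' hpos'] at hx
      obtain ⟨q, hq, rfl⟩ := hx
      rw [List.mem_map] at hq
      obtain ⟨p, hp, rfl⟩ := hq
      have hpmem := List.mem_of_mem_filter hp
      have hpch : cs.getD p.toNat 'a' = ch := by
        have := List.of_mem_filter hp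
        simpa using this
      have hrange := hpos p hpmem
      have hlt : p.toNat < cs.length := by omega
      refine ⟨p, hpmem, ?_⟩
      rw [show (p + 1).toNat = p.toNat + 1 by omega,
        List.drop_eq_getElem_cons hlt, List.take_succ_cons]
      rw [← hpch, List.getD_eq_getElem _ _ hlt]
      simp
    · rintro ⟨p, hp, rfl⟩
      have hrange := hpos p hp
      have hlt : p.toNat < cs.length := by omega
      refine ⟨cs.getD p.toNat 'a', ?_, ?_⟩
      · rw [PySem.List.mem_sorted, PySem.Set.mem_ofList, List.mem_map]
        exact ⟨p, hp, rfl⟩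
      · have hne' : (positions.filter (fun q => cs.getD q.toNat 'a' == cs.getD p.toNat 'a')).map (· + 1) ≠ [] := by
          simp only [ne_eq, List.map_eq_nil_iff, List.filter_eq_nil_iff, not_forall]
          exact ⟨p, hp, by simp⟩
        have hpos' : ∀ q ∈ (positions.filter (fun q => cs.getD q.toNat 'a' == cs.getD p.toNat 'a')).map (· + 1),
            0 ≤ q ∧ q.toNat + r ≤ cs.length := by
          intro q hq
          rw [List.mem_map] at hq
          obtain ⟨p', hp', rfl⟩ := hq
          have := hpos p' (List.mem_of_mem_filter hp')
          omega
        rw [ih _ _ hne' hpos']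
        refine ⟨p + 1, ?_, ?_⟩
        · rw [List.mem_map]
          exact ⟨p, by simp [List.mem_filter, hp], rfl⟩
        · rw [show (p + 1).toNat = p.toNat + 1 by omega,
            List.drop_eq_getElem_cons hlt, List.take_succ_cons,
            List.getD_eq_getElem _ _ hlt]
          simp

lemma collect_eq_bucket (t : String) (L : Nat) (_h1 : 1 ≤ L) (hL : L ≤ t.toList.length) :
    (radixCollect t.toList L
        (PySem.List.pyRange 0 ((t.toList.length : Int) - (L : Int) + 1) 1) []).map String.ofList
      = bucketBQ t L := by
  set positions := PySem.List.pyRange 0 ((t.toList.length : Int) - (L : Int) + 1) 1 with hposdef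
  have hposeq : positions = (List.range (t.toList.length - L + 1)).map (fun k : Nat => (k : Int)) := by
    rw [hposdef, PySem.List.pyRange_one,
      show ((((t.toList.length : Int)) - (L : Int) + 1) - 0).toNat = t.toList.length - L + 1 by omega]
    apply List.map_congr_left
    intro k _
    omega
  have hne : positions ≠ [] := by
    rw [hposeq]
    simp
  have hpos : ∀ p ∈ positions, 0 ≤ p ∧ p.toNat + L ≤ t.toList.length := by
    intro p hp
    rw [hposeq, List.mem_map] at hp
    obtain ⟨k, hk, rfl⟩ := hp
    rw [List.mem_range] at hk
    constructor
    · omega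
    · rw [Int.toNat_natCast]
      omega
  have hmem := radix_mem t.toList L positions [] hne hpos
  have hpw : ((radixCollect t.toList L positions []).map String.ofList).Pairwise
      (fun a b => a < b) := by
    rw [List.pairwise_map]
    refine (radix_pairwise t.toList L positions []).imp ?_
    intro a b hab
    rw [String.lt_iff_toList_lt]
    simpa using hab
  refine (PySem.List.sorted_eq_of_perm_of_pairwise_lt _ _ _ ?_ hpw).symm
  refine List.perm_of_nodup_nodup_toFinset_eq ?_ (PySem.Set.nodup_ofList _) ?_
  · exact hpw.imp (fun {a b} hab heq => absurd (heq ▸ hab) (lt_irrefl _))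
  · ext x
    simp only [List.mem_toFinset, List.mem_map, PySem.Set.mem_ofList]
    constructor
    · rintro ⟨l, hl, rfl⟩
      rw [hmem] at hl
      obtain ⟨p, hp, rfl⟩ := hl
      rw [hposeq, List.mem_map] at hp
      obtain ⟨k, hk, rfl⟩ := hp
      rw [List.mem_range] at hk
      unfold subsBQ
      rw [List.mem_map]
      refine ⟨k, List.mem_range.mpr hk, ?_⟩
      apply String.toList_inj.mp
      rw [Int.toNat_natCast, List.nil_append]
      simp [PySem.Str.toList_slice, PySem.Chars.slice_eq_listSlice, PySem.List.slice_natCast_add]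
    · intro hx
      have hxl := toList_of_mem_subs hx hL
      obtain ⟨i, hi, hxl⟩ := hxl
      refine ⟨x.toList, ?_, by simp⟩
      rw [hmem]
      refine ⟨(i : Int), ?_, ?_⟩
      · rw [hposeq, List.mem_map]
        exact ⟨i, List.mem_range.mpr (by omega), rfl⟩
      · rw [Int.toNat_natCast, List.nil_append]
        exact hxl

-- ===== VERDICT (by name: the statement is the Claim_ definition above) =====
theorem build_query_terms_spec : Claim_equal_build_query_terms := by
  intro t _
  unfold Spec_build_query_terms build_query_terms build_query_terms_alt
  simp only [PySem.Str.len_eq]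
  by_cases h0 : t.toList = []
  · simp [h0]
  · have hm1 : 0 < t.toList.length := List.length_pos_iff.mpr h0
    rw [if_neg h0, if_neg (by omega : ¬((t.toList.length : Int) = 0))]
    by_cases hs : 2 ≤ (t.toList.length : Int) ∧ (t.toList.length : Int) ≤ 24
    · rw [if_pos hs, if_neg (by omega : ¬((t.toList.length : Int) = 1 ∨ 24 < (t.toList.length : Int)))]
      simp only [foldl_add_map, foldl_update]
      rw [show PySem.Set.add PySem.Set.empty t = PySem.Set.ofList [t] from rfl, update_ofList,
        sorted2_lex]
      rw [show (fun x : String => toLex (-((x.toList.length : Int)), x)) = keyBQ from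
        by funext x; rw [keyBQ, PySem.Str.len_eq]]
      have hif : ((4 : Int) < (t.toList.length : Int)) = ((4 : Nat) < t.toList.length) := by
        apply propext
        exact_mod_cast Iff.rfl
      simp only [hif]
      rcases (by omega : t.toList.length = 2 ∨ t.toList.length = 3 ∨ 4 ≤ t.toList.length)
        with hc | hc | hc
      · have hP : PySem.List.pyRange (min 4 (t.toList.length : Int)) 1 (-1)
            = [(((2 : Nat)) : Int)] := by rw [hc]; decide
        rw [hP]
        simp only [List.flatMap_cons, List.flatMap_nil, List.foldl_cons, List.foldl_nil,
          Int.toNat_natCast]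
        rw [range_map_eq_subs t 2 (by omega), collect_eq_bucket t 2 (by omega) (by omega)]
        have hmain := mainBQ t [2] (by simp) (by intro L hL; simp at hL; omega)
          (Or.inr (by rw [hc]; decide))
        simp only [List.flatMap_cons, List.flatMap_nil, List.singleton_append,
          List.append_nil] at hmain ⊢
        exact hmain
      · have hP : PySem.List.pyRange (min 4 (t.toList.length : Int)) 1 (-1)
            = [(((3 : Nat)) : Int), (((2 : Nat)) : Int)] := by rw [hc]; decide
        rw [hP]
        simp only [List.flatMap_cons, List.flatMap_nil, List.foldl_cons, List.foldl_nil,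
          Int.toNat_natCast]
        rw [range_map_eq_subs t 3 (by omega), range_map_eq_subs t 2 (by omega),
          collect_eq_bucket t 3 (by omega) (by omega), collect_eq_bucket t 2 (by omega) (by omega)]
        have hmain := mainBQ t [3, 2] (by simp) (by intro L hL; simp at hL; omega)
          (Or.inr (by rw [hc]; decide))
        simp only [List.flatMap_cons, List.flatMap_nil, List.singleton_append,
          List.append_nil, List.append_assoc] at hmain ⊢
        exact hmain
      · have hP : PySem.List.pyRange (min 4 (t.toList.length : Int)) 1 (-1)
            = [(((4 : Nat)) : Int), (((3 : Nat)) : Int), (((2 : Nat)) : Int)] := by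
          rw [min_eq_left (by omega : (4 : Int) ≤ (t.toList.length : Int))]
          decide
        rw [hP]
        simp only [List.flatMap_cons, List.flatMap_nil, List.foldl_cons, List.foldl_nil,
          Int.toNat_natCast]
        rw [range_map_eq_subs t 4 (by omega), range_map_eq_subs t 3 (by omega),
          range_map_eq_subs t 2 (by omega),
          collect_eq_bucket t 4 (by omega) (by omega), collect_eq_bucket t 3 (by omega) (by omega),
          collect_eq_bucket t 2 (by omega) (by omega)]
        have hmain := mainBQ t [4, 3, 2] (by simp) (by intro L hL; simp at hL; omega)
          (by
            by_cases h4 : 4 < t.toList.length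
            · exact Or.inl h4
            · exact Or.inr (by rw [show t.toList.length = 4 by omega]; decide))
        simp only [List.flatMap_cons, List.flatMap_nil, List.singleton_append,
          List.append_nil, List.append_assoc] at hmain ⊢
        exact hmain
    · rw [if_neg hs, if_pos (by omega : ((t.toList.length : Int) = 1 ∨ 24 < (t.toList.length : Int)))]
      rw [sorted2_lex]
      exact PySem.List.sorted_eq_of_perm_of_pairwise_lt _ [t] _ (List.Perm.refl _)
        (List.pairwise_singleton _ _)
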